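-- pv_equiv track=rewrite | github.com/Katlii/stream-stop-words | src/stream_stop_words/streaming.py | cut_stream_stop_words
-- ===== SOURCE A (Python) =====
-- from typing import Generator, List
-- from collections import deque
--
-- def cut_stream_stop_words(token_stream: Generator[str, None, None],
--     stop_words: List[str],) -> Generator[str, None, None]:
--
--     # If stop words list is empty, yield all tokens as is
--     if not stop_words:
--         yield from token_stream
--         return
--     buffer = deque()  # holds tokens to be emitted
--     tail = ""         # holds the end of the current processed stream
--     processing_length = 0   # total length of processed characters
--     emitted_length = 0       # total length of emitted characters
--
--     max_stop_word_length = max(len(sw) for sw in stop_words)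
--
--     for token in token_stream:
--         buffer.append(token)
--
--         for char_in_token in token:
--             processing_length += 1
--             tail += char_in_token
--
--             # Keep tail length manageable
--             if len(tail) > max_stop_word_length:
--                 tail = tail[-max_stop_word_length:]
--
--             cut_index = None  # position to cut the stream if a stop word is found, None otherwise
--
--             for stop_word in stop_words:
--                 l = len(stop_word)
--                 # Check if the stop word matches the end of the tail, we use l because stop_word can be shorter than tail
--                 if l <= len(tail) and tail[-l:] == stop_word:
--                     start_index = processing_length - l
--                     if cut_index is None or start_index < cut_index:
--                         cut_index = start_index
--
--             # If we found a stop word, cut the stream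
--             if cut_index is not None:
--                 remaining_length = cut_index - emitted_length # how many characters we can still emit before the cut
--
--                 # Emit up to remaining_length characters from the buffer
--                 while buffer and remaining_length > 0:
--                     t = buffer[0]
--                     # Try to emit the whole token, otherwise emit part of it and stop
--                     if len(t) <= remaining_length:
--                         yield t
--                         emitted_length += len(t)
--                         remaining_length -= len(t)
--                         buffer.popleft()
--                     else:
--                         yield t[:remaining_length]
--                         emitted_length += remaining_length
--                         return
--                 # If we emitted exactly up to the cut index, we stop processing further
--                 return
--
--             # Calculate safe yield length for stream continuation, ensuring no stop word can be formed
--             # Safe charecter are considered those that are beyond the length of the longest stop word minus one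
--             # Like if we have "abcdef" and the longest stop word is "defg" (length 4), we can safely emit up to "abc"
--             safe_yield_length = processing_length - (max_stop_word_length - 1)
--
--             can_emit = safe_yield_length - emitted_length
--             if can_emit <= 0:
--                 continue # nothing to emit yet
--
--             # Emit safe characters from the buffer while we can emit
--             while buffer and can_emit > 0:
--                 t = buffer[0]
--                 if len(t) <= can_emit:
--                     yield t
--                     emitted_length += len(t)
--                     can_emit -= len(t)
--                     buffer.popleft()
--                 else:
--                     break
--
--     # If no stop words were found in the entire stream, emit the rest of the buffer
--     while buffer:
--         yield buffer.popleft()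
-- ===== SOURCE B (Python) =====
-- from typing import Generator, List
--
--
-- def cut_stream_stop_words(token_stream: Generator[str, None, None],
--     stop_words: List[str],) -> Generator[str, None, None]:
--     # Offline strategy: materialise the stream, join it into one text, locate the
--     # earliest-ending stop-word occurrence with str.find (one search per word),
--     # then re-emit tokens up to the cut in a single greedy pass.
--     tokens = list(token_stream)
--     words = [w for w in stop_words if w]  # the empty stop word never matches
--     if not words:
--         yield from tokens
--         return
--     text = "".join(tokens)
--     best = None  # (end, start) of the occurrence ending first; ties -> smaller start
--     for w in words:
--         i = text.find(w)
--         if i >= 0: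
--             cand = (i + len(w), i)
--             if best is None or cand < best:
--                 best = cand
--     if best is None:
--         yield from tokens
--         return
--     c = best[1]  # cut position in characters
--     acc = 0      # characters already emitted
--     for t in tokens:
--         if acc >= c:
--             return
--         if acc + len(t) <= c:
--             yield t
--             acc += len(t)
--         else:
--             yield t[:c - acc]
--             return
-- ===== Notes on version B (the rewrite author's own statement) =====
-- stated objective: alternative
-- what changed: A streams char-by-char, maintaining a deque buffer and a rolling tail and re-testing every stop word at every character; B materialises the stream, joins it once, runs one str.find per stop word to get the earliest-ending occurrence (ties broken by smaller start), and re-emits tokens up to the cut in a single offset-tracking pass.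
import Mathlib
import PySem

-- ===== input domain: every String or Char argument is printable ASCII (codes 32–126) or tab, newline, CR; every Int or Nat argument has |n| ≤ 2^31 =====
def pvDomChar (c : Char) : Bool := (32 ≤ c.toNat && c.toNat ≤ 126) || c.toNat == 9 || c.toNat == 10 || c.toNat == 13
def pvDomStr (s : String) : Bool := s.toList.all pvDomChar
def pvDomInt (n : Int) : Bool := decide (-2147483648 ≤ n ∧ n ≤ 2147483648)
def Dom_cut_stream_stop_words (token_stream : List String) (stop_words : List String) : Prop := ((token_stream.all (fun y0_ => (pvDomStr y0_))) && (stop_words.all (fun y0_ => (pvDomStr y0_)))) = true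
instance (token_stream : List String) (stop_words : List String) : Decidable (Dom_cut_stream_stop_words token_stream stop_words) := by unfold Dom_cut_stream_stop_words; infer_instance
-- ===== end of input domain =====

-- B replaces A's char-by-char streaming scan (deque buffer + rolling tail, every stop word
-- re-tested at every character) by a different algorithm: join the tokens once, one find per
-- stop word for the earliest-ending occurrence, then a single re-emission pass up to the cut.
-- Both Pythons are generators; equivalence is about the list of yielded values.

-- ===== PORT A =====

/-- The loop state of A: emitted output (`out`, the yields so far), `buffer` (deque of pending
tokens), `tail` (end of the processed stream, as code points), `processing` and `emitted`
character counts.  All counts are Nats; Python's subtractions that may go negative are guarded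
by the same `> 0` tests, where truncated subtraction agrees. -/
structure StA where
  out : List String
  buffer : List String
  tail : List Char
  processing : Nat
  emitted : Nat

/-- the `for stop_word in stop_words` fold computing `cut_index` -/
def aCutFold (processing : Nat) (tail : List Char) (sws : List String) : Option Nat :=
  sws.foldl (fun acc sw =>
    -- l <= len(tail) and tail[-l:] == stop_word
    if sw.toList.length ≤ tail.length ∧
        PySem.List.slice tail (some (-(sw.toList.length : Int))) none = sw.toList then
      let start := processing - sw.toList.length   -- start_index = processing_length - l (l ≤ processing here)
      match acc with
      | none => some start
      | some ci => if start < ci then some start else some ci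
    else acc) none

/-- the cut-emission loop: `while buffer and remaining_length > 0: …` -/
def aEmitCut : List String → Nat → List String
  | [], _ => []
  | t :: rest, rem =>
    if rem = 0 then []                        -- remaining_length > 0 fails (Python value ≤ 0)
    else if t.toList.length ≤ rem then t :: aEmitCut rest (rem - t.toList.length)
    else [PySem.Str.slice t none (some (rem : Nat))]   -- yield t[:remaining_length]; return

/-- the safe-emission loop: `while buffer and can_emit > 0: … else break`;
returns (emitted tokens, rest of buffer) -/
def aEmitSafe : List String → Nat → (List String × List String)
  | [], _ => ([], [])
  | t :: rest, can =>
    if can = 0 then ([], t :: rest)           -- can_emit > 0 fails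
    else if t.toList.length ≤ can then
      let p := aEmitSafe rest (can - t.toList.length)
      (t :: p.1, p.2)
    else ([], t :: rest)                      -- break

/-- the body of `for char_in_token in token` -/
def aChar (m : Nat) (sws : List String) (st : StA) (c : Char) : Sum (List String) StA :=
  let processing := st.processing + 1
  let tail0 := st.tail ++ [c]
  -- if len(tail) > max_stop_word_length: tail = tail[-max_stop_word_length:]
  let tail := if tail0.length > m then PySem.List.slice tail0 (some (-(m : Int))) none else tail0
  match aCutFold processing tail sws with
  | some ci =>
      -- cut found: emit up to cut_index - emitted_length characters, then return
      Sum.inl (st.out ++ aEmitCut st.buffer (ci - st.emitted))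
  | none =>
      -- safe_yield_length = processing_length - (max_stop_word_length - 1)
      let safe := processing + 1 - m
      let canEmit := safe - st.emitted
      if canEmit = 0 then Sum.inr { st with processing := processing, tail := tail }  -- can_emit <= 0: continue
      else
        let p := aEmitSafe st.buffer canEmit
        Sum.inr { out := st.out ++ p.1, buffer := p.2, tail := tail,
                  processing := processing,
                  emitted := st.emitted + (p.1.map (fun t => t.toList.length)).sum }

/-- `for char_in_token in token`, with early `return` propagated as `Sum.inl` -/
def aChars (m : Nat) (sws : List String) : List Char → StA → Sum (List String) StA
  | [], st => Sum.inr st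
  | c :: cs, st =>
    match aChar m sws st c with
    | Sum.inl o => Sum.inl o
    | Sum.inr st' => aChars m sws cs st'

/-- `for token in token_stream` (appending the token to the buffer first), then the final flush -/
def aTokens (m : Nat) (sws : List String) : List String → StA → List String
  | [], st => st.out ++ st.buffer             -- while buffer: yield buffer.popleft()
  | t :: ts, st =>
    match aChars m sws t.toList { st with buffer := st.buffer ++ [t] } with
    | Sum.inl o => o
    | Sum.inr st' => aTokens m sws ts st'

def cut_stream_stop_words (token_stream : List String) (stop_words : List String) : List String :=
  match stop_words with
  | [] => token_stream                        -- if not stop_words: yield from token_stream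
  | s0 :: rest =>
    -- max_stop_word_length = max(len(sw) for sw in stop_words)  (stop_words nonempty here)
    let m := rest.foldl (fun a sw => Nat.max a sw.toList.length) s0.toList.length
    aTokens m (s0 :: rest) token_stream ⟨[], [], [], 0, 0⟩

-- ===== PORT B =====

/-- loop body of `for w in words` keeping the lexicographically least `(end, start)` candidate -/
def bStep (text : List Char) (best : Option (Nat × Nat)) (w : String) : Option (Nat × Nat) :=
  let i := PySem.Chars.find text w.toList    -- i = text.find(w)
  if 0 ≤ i then
    let cand : Nat × Nat := (i.toNat + w.toList.length, i.toNat)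
    match best with
    | none => some cand
    | some b => if cand.1 < b.1 ∨ (cand.1 = b.1 ∧ cand.2 < b.2) then some cand else some b  -- tuple <
  else best

/-- final pass: emit whole tokens while they end at or before the cut `c`, tracking the
absolute offset `acc` of characters already emitted, else a prefix -/
def bGreedy : List String → Nat → Nat → List String
  | [], _, _ => []
  | t :: rest, c, acc =>
    if c ≤ acc then []                        -- if acc >= c: return
    else if acc + t.toList.length ≤ c then t :: bGreedy rest c (acc + t.toList.length)
    else [PySem.Str.slice t none (some ((c - acc : Nat)))]   -- yield t[:c - acc]; return

def cut_stream_stop_words_alt (token_stream : List String) (stop_words : List String) : List String :=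
  let words := stop_words.filter (fun w => !w.toList.isEmpty)   -- [w for w in stop_words if w]
  if words.isEmpty then token_stream
  else
    let text := (token_stream.map String.toList).flatten        -- "".join(tokens), as code points
    match words.foldl (bStep text) none with
    | none => token_stream
    | some best => bGreedy token_stream best.2 0

-- ===== PRECONDITION & SPEC =====
def Spec_cut_stream_stop_words (token_stream : List String) (stop_words : List String) (out : List String) : Prop := out = cut_stream_stop_words_alt token_stream stop_words
instance (token_stream : List String) (stop_words : List String) (out : List String) : Decidable (Spec_cut_stream_stop_words token_stream stop_words out) := by unfold Spec_cut_stream_stop_words; infer_instance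

-- ===== CLAIM (what is proved, stated in full; the proofs are below) =====
def Claim_equal_cut_stream_stop_words : Prop := ∀ (token_stream : List String) (stop_words : List String), Dom_cut_stream_stop_words token_stream stop_words → Spec_cut_stream_stop_words token_stream stop_words (cut_stream_stop_words token_stream stop_words)

-- ===== LEMMAS AND PROOFS =====

-- ---------- basic abbreviations ----------

/-- total number of characters in a list of tokens -/
def sumLen (xs : List String) : Nat := (xs.map (fun t => t.toList.length)).sum

/-- the concatenated text of a list of tokens, as code points -/
def flatT (xs : List String) : List Char := (xs.map String.toList).flatten

/-- a stop word `w` matches ending at position `e` of text `T` (1-based end) -/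
def MatchAt (w T : List Char) (e : Nat) : Prop :=
  w ≠ [] ∧ w.length ≤ e ∧ (T.take e).drop (e - w.length) = w

def matchAtB (w T : List Char) (e : Nat) : Bool :=
  decide (w ≠ []) && decide (w.length ≤ e) && decide ((T.take e).drop (e - w.length) = w)

/-- some stop word of `sws` matches ending at `e` -/
def Mstop (sws : List String) (T : List Char) (e : Nat) : Prop :=
  ∃ s ∈ sws, MatchAt s.toList T e

def nmin (a b : Nat) : Nat := if a ≤ b then a else b

/-- the minimal start index `e - len w` over the stop words matching at `e` -/
def minStart (T : List Char) (e : Nat) : List String → Option Nat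
  | [] => none
  | s :: r =>
    if matchAtB s.toList T e then
      match minStart T e r with
      | none => some (e - s.toList.length)
      | some c => some (nmin (e - s.toList.length) c)
    else minStart T e r

/-- what A's `tail` variable holds after processing text `p` -/
def pyTail (m : Nat) (p : List Char) : List Char :=
  if m = 0 then p else p.drop (p.length - m)

def omin : Option Nat → Option Nat → Option Nat
  | none, b => b
  | some a, none => some a
  | some a, some b => some (nmin a b)

/-- A's loop invariant -/
def InvA (m : Nat) (st : StA) (prev : List Char) (consumed : List String) : Prop :=
  st.processing = prev.length ∧
  st.tail = pyTail m prev ∧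
  st.out ++ st.buffer = consumed ∧
  st.emitted = sumLen st.out ∧
  (∀ j, j < st.out.length → sumLen (st.out.take j) + m ≤ prev.length) ∧
  (st.out = [] ∨ sumLen st.out + m ≤ prev.length + 1)

/-- `e` is the first match ending position after `lo`, with minimal start `c` -/
def CutRes (sws : List String) (X : List Char) (lo e c : Nat) : Prop :=
  lo < e ∧ Mstop sws X e ∧ (∀ e', lo < e' → e' < e → ¬ Mstop sws X e') ∧
  minStart X e sws = some c

-- ---------- small facts ----------

theorem sumLen_nil : sumLen [] = 0 := rfl

theorem sumLen_cons (t : String) (xs : List String) :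
    sumLen (t :: xs) = t.toList.length + sumLen xs := by
  simp [sumLen]

theorem sumLen_append (a b : List String) : sumLen (a ++ b) = sumLen a + sumLen b := by
  simp [sumLen]

theorem length_flatT (xs : List String) : (flatT xs).length = sumLen xs := by
  simp [flatT, sumLen, List.length_flatten, Function.comp_def]

theorem flatT_nil : flatT [] = [] := rfl

theorem flatT_append (a b : List String) : flatT (a ++ b) = flatT a ++ flatT b := by
  simp [flatT]

theorem flatT_singleton (t : String) : flatT [t] = t.toList := by
  simp [flatT]

theorem matchAtB_iff (w T : List Char) (e : Nat) :
    matchAtB w T e = true ↔ MatchAt w T e := by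
  simp [matchAtB, MatchAt, and_assoc]

theorem matchAt_iff_prefix (w T : List Char) (e : Nat) :
    MatchAt w T e ↔ w ≠ [] ∧ w.length ≤ e ∧ w <+: T.drop (e - w.length) := by
  unfold MatchAt
  constructor
  · rintro ⟨hw, hl, hs⟩
    refine ⟨hw, hl, ?_⟩
    rw [List.prefix_iff_eq_take]
    rw [List.drop_take] at hs
    have h1 : e - (e - w.length) = w.length := by omega
    rw [h1] at hs
    exact hs.symm
  · rintro ⟨hw, hl, hs⟩
    refine ⟨hw, hl, ?_⟩
    rw [List.drop_take]
    have h1 : e - (e - w.length) = w.length := by omega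
    rw [h1]
    exact (List.prefix_iff_eq_take.1 hs).symm

theorem matchAt_le_length {w T : List Char} {e : Nat} (h : MatchAt w T e) : e ≤ T.length := by
  rcases h with ⟨hw, hl, hs⟩
  have hlen := congrArg List.length hs
  simp only [List.length_drop, List.length_take] at hlen
  have hwpos : 0 < w.length := List.length_pos_iff.mpr hw
  omega

theorem matchAt_append_iff {w X : List Char} (Y : List Char) {e : Nat} (he : e ≤ X.length) :
    MatchAt w (X ++ Y) e ↔ MatchAt w X e := by
  unfold MatchAt
  rw [List.take_append]
  have h0 : e - X.length = 0 := by omega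
  rw [h0]
  simp

theorem mstop_append_iff {sws : List String} {X : List Char} (Y : List Char) {e : Nat}
    (he : e ≤ X.length) : Mstop sws (X ++ Y) e ↔ Mstop sws X e := by
  unfold Mstop
  constructor <;> (rintro ⟨s, hs, hm⟩; exact ⟨s, hs, by rwa [matchAt_append_iff Y he] at *⟩)

theorem minStart_append (sws : List String) {X : List Char} (Y : List Char) {e : Nat}
    (he : e ≤ X.length) : minStart (X ++ Y) e sws = minStart X e sws := by
  induction sws with
  | nil => rfl
  | cons s r ih =>
    have hb : matchAtB s.toList (X ++ Y) e = matchAtB s.toList X e := by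
      by_cases h : MatchAt s.toList X e
      · rw [(matchAtB_iff _ _ _).2 h, (matchAtB_iff _ _ _).2 ((matchAt_append_iff Y he).2 h)]
      · have h1 : matchAtB s.toList X e = false := by
          rw [← Bool.not_eq_true, matchAtB_iff]; exact h
        have h2 : matchAtB s.toList (X ++ Y) e = false := by
          rw [← Bool.not_eq_true, matchAtB_iff, matchAt_append_iff Y he]; exact h
        rw [h1, h2]
    simp only [minStart, hb, ih]

theorem minStart_none_iff (T : List Char) (e : Nat) (sws : List String) :
    minStart T e sws = none ↔ ∀ s ∈ sws, ¬ MatchAt s.toList T e := by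
  induction sws with
  | nil => simp [minStart]
  | cons s r ih =>
    by_cases h : MatchAt s.toList T e
    · simp only [minStart, (matchAtB_iff _ _ _).2 h, if_true]
      constructor
      · intro hn; cases hr : minStart T e r <;> simp [hr] at hn
      · intro hall; exact absurd h (hall s (by simp))
    · have hb : matchAtB s.toList T e = false := by
        rw [← Bool.not_eq_true, matchAtB_iff]; exact h
      simp only [minStart, hb, Bool.false_eq_true, if_false, ih]
      constructor
      · intro hall s' hs'
        rcases List.mem_cons.1 hs' with hs' | hs'
        · subst hs'; exact h
        · exact hall s' hs'
      · intro hall s' hs'; exact hall s' (List.mem_cons_of_mem _ hs')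

theorem minStart_some {T : List Char} {e : Nat} {sws : List String} {c : Nat}
    (h : minStart T e sws = some c) :
    (∃ s ∈ sws, MatchAt s.toList T e ∧ c = e - s.toList.length) ∧
    (∀ s ∈ sws, MatchAt s.toList T e → c ≤ e - s.toList.length) := by
  induction sws generalizing c with
  | nil => simp [minStart] at h
  | cons s r ih =>
    by_cases hms : MatchAt s.toList T e
    · simp only [minStart, (matchAtB_iff _ _ _).2 hms, if_true] at h
      cases hr : minStart T e r with
      | none =>
        rw [hr] at h
        have hc : c = e - s.toList.length := by
          simpa using h.symm
        refine ⟨⟨s, by simp, hms, hc⟩, ?_⟩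
        intro s2 hs2 hms2
        rcases List.mem_cons.1 hs2 with rfl | hs2
        · omega
        · exact absurd hms2 ((minStart_none_iff T e r).1 hr s2 hs2)
      | some cr =>
        rw [hr] at h
        have hc : c = nmin (e - s.toList.length) cr := by simpa using h.symm
        obtain ⟨⟨s0, hs0, hms0, hc0⟩, hmin⟩ := ih hr
        have hcle1 : c ≤ e - s.toList.length := by rw [hc]; unfold nmin; split <;> omega
        have hcle2 : c ≤ cr := by rw [hc]; unfold nmin; split <;> omega
        have hcor : c = e - s.toList.length ∨ c = cr := by
          rw [hc]; unfold nmin; split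
          · left; rfl
          · right; rfl
        clear hc
        constructor
        · rcases hcor with hco | hco
          · exact ⟨s, by simp, hms, hco⟩
          · exact ⟨s0, List.mem_cons_of_mem _ hs0, hms0, by omega⟩
        · intro s2 hs2 hms2
          rcases List.mem_cons.1 hs2 with rfl | hs2
          · omega
          · have := hmin s2 hs2 hms2
            omega
    · have hb : matchAtB s.toList T e = false := by
        rw [← Bool.not_eq_true, matchAtB_iff]; exact hms
      simp only [minStart, hb, Bool.false_eq_true, if_false] at h
      obtain ⟨⟨s0, hs0, hms0, hc0⟩, hmin⟩ := ih h
      refine ⟨⟨s0, List.mem_cons_of_mem _ hs0, hms0, hc0⟩, ?_⟩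
      intro s2 hs2 hms2
      rcases List.mem_cons.1 hs2 with rfl | hs2
      · exact absurd hms2 hms
      · exact hmin s2 hs2 hms2

-- ---------- pyTail facts ----------

theorem pyTail_nil (m : Nat) : pyTail m [] = [] := by
  unfold pyTail; split <;> simp

theorem pyTail_length (m : Nat) (p : List Char) :
    (pyTail m p).length = if m = 0 then p.length else min p.length m := by
  unfold pyTail
  split
  · simp
  · simp
    omega

theorem pyTail_ne_nil {m : Nat} {p : List Char} (hp : p ≠ []) : pyTail m p ≠ [] := by
  intro h
  have := congrArg List.length h
  rw [pyTail_length] at this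
  simp at this
  split at this <;> simp_all

/-- A's tail update computes `pyTail` of the extended text. -/
theorem tail_step (m : Nat) (prev : List Char) (c : Char) :
    (if (pyTail m prev ++ [c]).length > m
      then PySem.List.slice (pyTail m prev ++ [c]) (some (-(m : Int))) none
      else pyTail m prev ++ [c]) = pyTail m (prev ++ [c]) := by
  by_cases hm0 : m = 0
  · subst hm0
    simp only [pyTail, reduceIte]
    rw [if_pos (by simp)]
    have h0 : (-(0 : Nat) : Int) = ((0 : Nat) : Int) := by simp
    rw [h0, PySem.List.slice_from_natCast]
    simp
  · simp only [pyTail, if_neg hm0]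
    by_cases hpm : prev.length < m
    · have hd : prev.length - m = 0 := by omega
      have hd2 : (prev ++ [c]).length - m = 0 := by simp; omega
      rw [hd, hd2]
      rw [if_neg (by simp; omega)]
      simp
    · have hlen : (prev.drop (prev.length - m) ++ [c]).length = m + 1 := by
        simp; omega
      rw [if_pos (by omega)]
      rw [PySem.List.slice_from_neg_natCast _ m (by omega)]
      rw [hlen]
      have hstep : m + 1 - m = 1 := by omega
      rw [hstep]
      rw [List.drop_append_of_le_length (by simp; omega)]
      rw [List.drop_drop]
      have hidx : prev.length - m + 1 = (prev ++ [c]).length - m := by simp; omega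
      rw [hidx]
      rw [List.drop_append_of_le_length (by simp; omega)]

/-- the slice A compares against a stop word is a plain suffix of the processed text -/
theorem tail_slice (m : Nat) (prev : List Char) (l : Nat) (hl1 : 1 ≤ l)
    (hlm : l ≤ m) :
    l ≤ (pyTail m prev).length ↔ l ≤ prev.length := by
  rw [pyTail_length]
  rw [if_neg (by omega)]
  omega

theorem tail_slice_eq (m : Nat) (prev : List Char) (l : Nat) (hl1 : 1 ≤ l) (hlm : l ≤ m)
    (hl : l ≤ (pyTail m prev).length) :
    PySem.List.slice (pyTail m prev) (some (-(l : Int))) none = prev.drop (prev.length - l) := by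
  have hl2 := hl
  rw [pyTail_length, if_neg (by omega)] at hl2
  rw [PySem.List.slice_from_neg_natCast _ l (by omega)]
  unfold pyTail
  rw [if_neg (by omega)]
  rw [List.drop_drop, List.length_drop]
  congr 1
  omega

-- ---------- A's cut fold = minStart ----------

theorem cond_iff_matchAt (m : Nat) (prev : List Char) (hp : prev ≠ []) (sw : String)
    (hm : sw.toList.length ≤ m) :
    (sw.toList.length ≤ (pyTail m prev).length ∧
      PySem.List.slice (pyTail m prev) (some (-(sw.toList.length : Int))) none = sw.toList)
    ↔ MatchAt sw.toList prev prev.length := by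
  by_cases hw : sw.toList = []
  · rw [hw]
    constructor
    · rintro ⟨-, hs⟩
      exfalso
      apply pyTail_ne_nil (m := m) hp
      simp only [List.length_nil] at hs
      have h0 : (-((0 : Nat) : Int)) = ((0 : Nat) : Int) := by simp
      rw [h0, PySem.List.slice_from_natCast] at hs
      simpa using hs
    · rintro ⟨hne, -⟩
      exact absurd rfl hne
  · have hl1 : 1 ≤ sw.toList.length := by
      have := List.length_pos_iff.mpr hw
      omega
    unfold MatchAt
    rw [List.take_length]
    constructor
    · rintro ⟨hle, hs⟩
      have hlep : sw.toList.length ≤ prev.length := (tail_slice m prev _ hl1 hm).1 hle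
      rw [tail_slice_eq m prev _ hl1 hm hle] at hs
      exact ⟨hw, hlep, hs⟩
    · rintro ⟨-, hlep, hs⟩
      have hle : sw.toList.length ≤ (pyTail m prev).length :=
        (tail_slice m prev _ hl1 hm).2 hlep
      exact ⟨hle, by rw [tail_slice_eq m prev _ hl1 hm hle]; exact hs⟩

theorem aCutFold_eq_minStart (m : Nat) (prev : List Char) (hp : prev ≠ [])
    (sws : List String) (hm : ∀ s ∈ sws, s.toList.length ≤ m) :
    aCutFold prev.length (pyTail m prev) sws = minStart prev prev.length sws := by
  have aux : ∀ (l : List String), (∀ s ∈ l, s.toList.length ≤ m) → ∀ (acc : Option Nat),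
      l.foldl (fun acc sw =>
        if sw.toList.length ≤ (pyTail m prev).length ∧
            PySem.List.slice (pyTail m prev) (some (-(sw.toList.length : Int))) none = sw.toList then
          let start := prev.length - sw.toList.length
          match acc with
          | none => some start
          | some ci => if start < ci then some start else some ci
        else acc) acc = omin acc (minStart prev prev.length l) := by
    intro l
    induction l with
    | nil =>
      intro _ acc
      cases acc <;> rfl
    | cons s r ih =>
      intro hml acc
      simp only [List.foldl_cons]
      rw [ih (fun s2 hs2 => hml s2 (List.mem_cons_of_mem _ hs2))]
      have hmin : ∀ (x y : Nat),
          (if x < y then some x else some y) = some (nmin x y) := by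
        intro x y; unfold nmin; split_ifs <;> (try rfl) <;> (congr 1; omega)
      by_cases hc : MatchAt s.toList prev prev.length
      · rw [if_pos ((cond_iff_matchAt m prev hp s (hml s (by simp))).2 hc)]
        cases acc with
        | none =>
          cases hr : minStart prev prev.length r with
          | none => simp [minStart, (matchAtB_iff _ _ _).2 hc, hr, omin]
          | some cr => simp [minStart, (matchAtB_iff _ _ _).2 hc, hr, omin]
        | some a =>
          cases hr : minStart prev prev.length r with
          | none =>
            simp only [minStart, (matchAtB_iff _ _ _).2 hc, if_true, hr, omin, hmin]
            congr 1
            unfold nmin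
            split_ifs <;> omega
          | some cr =>
            simp only [minStart, (matchAtB_iff _ _ _).2 hc, if_true, hr, omin, hmin]
            congr 1
            unfold nmin
            split_ifs <;> omega
      · rw [if_neg (fun hcond => hc ((cond_iff_matchAt m prev hp s (hml s (by simp))).1 hcond))]
        have hb : matchAtB s.toList prev prev.length = false := by
          rw [← Bool.not_eq_true, matchAtB_iff]; exact hc
        simp only [minStart, hb, Bool.false_eq_true, if_false]
  unfold aCutFold
  rw [aux sws hm none]
  cases minStart prev prev.length sws <;> rfl

-- ---------- emission lemmas ----------

/-- B's absolute-offset pass computes the same list as A's budget-decrementing pass -/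
theorem bGreedy_eq_emitCut : ∀ (toks : List String) (c acc : Nat),
    bGreedy toks c acc = aEmitCut toks (c - acc) := by
  intro toks
  induction toks with
  | nil => intro c acc; rfl
  | cons t r ih =>
    intro c acc
    by_cases h1 : c ≤ acc
    · simp only [bGreedy, if_pos h1]
      rw [show c - acc = 0 from by omega]
      simp [aEmitCut]
    · simp only [bGreedy, if_neg h1, aEmitCut]
      rw [if_neg (by omega : ¬ c - acc = 0)]
      by_cases h2 : acc + t.toList.length ≤ c
      · rw [if_pos h2, if_pos (by omega : t.toList.length ≤ c - acc), ih]
        rw [show c - (acc + t.toList.length) = c - acc - t.toList.length from by omega]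
      · rw [if_neg h2, if_neg (by omega : ¬ t.toList.length ≤ c - acc)]

theorem aEmitCut_append_emit (out rest : List String) (c : Nat)
    (h1 : ∀ j, j < out.length → sumLen (out.take j) < c)
    (h2 : sumLen out ≤ c) :
    aEmitCut (out ++ rest) c = out ++ aEmitCut rest (c - sumLen out) := by
  induction out generalizing c with
  | nil => simp [sumLen]
  | cons t o ih =>
    have hc0 : 0 < c := by
      have := h1 0 (by simp)
      simpa [sumLen] using this
    have htc : t.toList.length ≤ c := by
      have := h2
      rw [sumLen_cons] at this
      omega
    simp only [List.cons_append, aEmitCut, if_neg (by omega : ¬ c = 0), if_pos htc]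
    rw [ih]
    · rw [sumLen_cons]
      have harg : c - t.toList.length - sumLen o = c - (t.toList.length + sumLen o) := by omega
      rw [harg]
    · intro j hj
      have := h1 (j + 1) (by simpa using hj)
      rw [List.take_succ_cons, sumLen_cons] at this
      omega
    · rw [sumLen_cons] at h2
      omega

theorem aEmitCut_append_of_lt (xs rest : List String) (c : Nat) (h : c < sumLen xs) :
    aEmitCut (xs ++ rest) c = aEmitCut xs c := by
  induction xs generalizing c with
  | nil => simp [sumLen] at h
  | cons t o ih =>
    simp only [List.cons_append, aEmitCut]
    split
    · rfl
    · rw [sumLen_cons] at h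
      split
      · rw [ih]
        omega
      · rfl

theorem aEmitSafe_spec : ∀ (buf : List String) (can : Nat),
    (aEmitSafe buf can).1 ++ (aEmitSafe buf can).2 = buf ∧
    sumLen (aEmitSafe buf can).1 ≤ can ∧
    (∀ j, j < (aEmitSafe buf can).1.length → sumLen ((aEmitSafe buf can).1.take j) < can) := by
  intro buf can
  induction buf generalizing can with
  | nil => simp [aEmitSafe, sumLen]
  | cons t rest ih =>
    by_cases hc : can = 0
    · subst hc
      simp [aEmitSafe, sumLen]
    · by_cases ht : t.toList.length ≤ can
      · simp only [aEmitSafe, if_neg hc, if_pos ht]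
        obtain ⟨ha, hb, hcc⟩ := ih (can - t.toList.length)
        refine ⟨by simpa using ha, ?_, ?_⟩
        · rw [sumLen_cons]
          omega
        · intro j hj
          cases j with
          | zero =>
            simp only [List.take_zero, sumLen_nil]
            omega
          | succ j2 =>
            simp only [List.take_succ_cons, sumLen_cons]
            have := hcc j2 (by simpa using hj)
            omega
      · have hres : aEmitSafe (t :: rest) can = ([], t :: rest) := by
          unfold aEmitSafe
          rw [if_neg hc, if_neg ht]
        rw [hres]
        exact ⟨rfl, by simp [sumLen], fun j hj => by simp at hj⟩

-- ---------- the main A-side induction ----------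

theorem mstop_le_length {sws : List String} {T : List Char} {e : Nat} (h : Mstop sws T e) :
    e ≤ T.length := by
  rcases h with ⟨s, _, hm⟩
  exact matchAt_le_length hm

theorem flatT_cons (t : String) (ts : List String) : flatT (t :: ts) = t.toList ++ flatT ts := by
  simp [flatT]

/-- one character step of A: either the cut fires (at the minimal start for this end
position) and A returns the greedy cut of everything consumed so far, or the invariant
is maintained for the extended text. -/
theorem aChar_step (m : Nat) (sws : List String) (hm : ∀ s ∈ sws, s.toList.length ≤ m)
    (st : StA) (prev : List Char) (consumed : List String) (c : Char)
    (hInv : InvA m st prev consumed) :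
    (∃ ci, minStart (prev ++ [c]) (prev ++ [c]).length sws = some ci ∧
      Mstop sws (prev ++ [c]) (prev ++ [c]).length ∧
      aChar m sws st c = Sum.inl (aEmitCut consumed ci)) ∨
    (¬ Mstop sws (prev ++ [c]) (prev ++ [c]).length ∧
      ∃ st2, aChar m sws st c = Sum.inr st2 ∧ InvA m st2 (prev ++ [c]) consumed) := by
  obtain ⟨h1, h2, h3, h4, h5, h6⟩ := hInv
  have hplen : (prev ++ [c]).length = prev.length + 1 := by simp
  have htail : (if (st.tail ++ [c]).length > m
      then PySem.List.slice (st.tail ++ [c]) (some (-(m : Int))) none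
      else st.tail ++ [c]) = pyTail m (prev ++ [c]) := by
    rw [h2]; exact tail_step m prev c
  have hfold : aCutFold (st.processing + 1)
      (if (st.tail ++ [c]).length > m
        then PySem.List.slice (st.tail ++ [c]) (some (-(m : Int))) none
        else st.tail ++ [c]) sws
      = minStart (prev ++ [c]) (prev ++ [c]).length sws := by
    rw [htail, h1, ← hplen]
    exact aCutFold_eq_minStart m (prev ++ [c]) (by simp) sws hm
  cases hms : minStart (prev ++ [c]) (prev ++ [c]).length sws with
  | some ci =>
    left
    obtain ⟨⟨s0, hs0, hm0, hceq⟩, hmle⟩ := minStart_some hms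
    have hl01 : 1 ≤ s0.toList.length := List.length_pos_iff.mpr hm0.1
    have hl0m : s0.toList.length ≤ m := hm s0 hs0
    have hl0e : s0.toList.length ≤ (prev ++ [c]).length := hm0.2.1
    refine ⟨ci, rfl, ⟨s0, hs0, hm0⟩, ?_⟩
    have hachar : aChar m sws st c = Sum.inl (st.out ++ aEmitCut st.buffer (ci - st.emitted)) := by
      simp only [aChar]
      rw [hfold, hms]
    rw [hachar]
    have hG1 : ∀ j, j < st.out.length → sumLen (st.out.take j) < ci := by
      intro j hj
      have := h5 j hj
      omega
    have hG2 : sumLen st.out ≤ ci := by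
      rcases h6 with h6 | h6
      · rw [h6, sumLen_nil]; omega
      · omega
    rw [← h3, aEmitCut_append_emit st.out st.buffer ci hG1 hG2, ← h4]
  | none =>
    right
    have hnm : ¬ Mstop sws (prev ++ [c]) (prev ++ [c]).length := by
      rintro ⟨s, hs, hmm⟩
      exact (minStart_none_iff _ _ _).1 hms s hs hmm
    refine ⟨hnm, ?_⟩
    by_cases hce : (st.processing + 1 + 1 - m) - st.emitted = 0
    · refine ⟨{ st with processing := st.processing + 1,
                        tail := pyTail m (prev ++ [c]) }, ?_, ?_⟩
      · simp only [aChar]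
        rw [hfold, hms, htail, if_pos hce]
      · refine ⟨by simp [h1], rfl, h3, h4, ?_, ?_⟩
        · intro j hj
          have hj2 : j < st.out.length := hj
          show sumLen (st.out.take j) + m ≤ (prev ++ [c]).length
          have := h5 j hj2
          rw [hplen]
          omega
        · rcases h6 with h6 | h6
          · exact Or.inl h6
          · right
            show sumLen st.out + m ≤ (prev ++ [c]).length + 1
            rw [hplen]
            omega
    · set can := (st.processing + 1 + 1 - m) - st.emitted with hcandef
      obtain ⟨hsp1, hsp2, hsp3⟩ := aEmitSafe_spec st.buffer can
      refine ⟨{ out := st.out ++ (aEmitSafe st.buffer can).1,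
                buffer := (aEmitSafe st.buffer can).2,
                tail := pyTail m (prev ++ [c]),
                processing := st.processing + 1,
                emitted := st.emitted + ((aEmitSafe st.buffer can).1.map (fun t => t.toList.length)).sum }, ?_, ?_⟩
      · simp only [aChar]
        rw [hfold, hms, htail, if_neg hce]
      · have hsum : ((aEmitSafe st.buffer can).1.map (fun t => t.toList.length)).sum
            = sumLen (aEmitSafe st.buffer can).1 := rfl
        refine ⟨by simp [h1], rfl, ?_, ?_, ?_, ?_⟩
        · show st.out ++ (aEmitSafe st.buffer can).1 ++ (aEmitSafe st.buffer can).2 = consumed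
          rw [List.append_assoc, hsp1, h3]
        · show st.emitted + _ = sumLen (st.out ++ (aEmitSafe st.buffer can).1)
          rw [hsum, sumLen_append, h4]
        · intro j hj
          show sumLen ((st.out ++ (aEmitSafe st.buffer can).1).take j) + m ≤ (prev ++ [c]).length
          rw [List.take_append, sumLen_append, hplen]
          have hjlt : j < st.out.length + (aEmitSafe st.buffer can).1.length := by
            simpa using hj
          by_cases hj2 : j < st.out.length
          · have hz : j - st.out.length = 0 := by omega
            rw [hz]
            have := h5 j hj2
            simp only [List.take_zero, sumLen_nil]
            omega
          · have htko : st.out.take j = st.out := List.take_of_length_le (by omega)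
            rw [htko]
            have := hsp3 (j - st.out.length) (by omega)
            rw [h4] at hcandef
            omega
        · right
          show sumLen (st.out ++ (aEmitSafe st.buffer can).1) + m ≤ (prev ++ [c]).length + 1
          rw [sumLen_append, hplen]
          rw [h4] at hcandef
          omega

theorem aChars_run (m : Nat) (sws : List String) (hm : ∀ s ∈ sws, s.toList.length ≤ m) :
    ∀ (cs : List Char) (st : StA) (prev : List Char) (consumed : List String),
    InvA m st prev consumed → flatT consumed = prev ++ cs →
    (∃ e c, CutRes sws (prev ++ cs) prev.length e c ∧ c < sumLen consumed ∧
      aChars m sws cs st = Sum.inl (aEmitCut consumed c))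
    ∨ ((∀ e, prev.length < e → ¬ Mstop sws (prev ++ cs) e) ∧
      ∃ st', aChars m sws cs st = Sum.inr st' ∧ InvA m st' (prev ++ cs) consumed) := by
  intro cs
  induction cs with
  | nil =>
    intro st prev consumed hInv hflat
    right
    refine ⟨?_, st, rfl, by simpa using hInv⟩
    intro e he hM
    have := mstop_le_length hM
    simp at this
    omega
  | cons c cs ih =>
    intro st prev consumed hInv hflat
    have hXcons : prev ++ c :: cs = (prev ++ [c]) ++ cs := by simp
    have hplen : (prev ++ [c]).length = prev.length + 1 := by simp
    rw [hXcons]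
    rcases aChar_step m sws hm st prev consumed c hInv with
      ⟨ci, hms, hM, heq⟩ | ⟨hnm, st2, heq, hInv2⟩
    · left
      refine ⟨(prev ++ [c]).length, ci, ⟨by omega, ?_, ?_, ?_⟩, ?_, ?_⟩
      · exact (mstop_append_iff cs (le_refl _)).2 hM
      · intro e' he1 he2
        rw [hplen] at he2
        omega
      · rw [minStart_append sws cs (le_refl _)]
        exact hms
      · obtain ⟨⟨s0, hs0, hm0, hceq⟩, -⟩ := minStart_some hms
        have hl01 : 1 ≤ s0.toList.length := List.length_pos_iff.mpr hm0.1
        have hl0e : s0.toList.length ≤ (prev ++ [c]).length := hm0.2.1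
        have hsl : sumLen consumed = (prev ++ c :: cs).length := by
          rw [← length_flatT, hflat]
        rw [hsl]
        simp only [List.length_append, List.length_cons] at *
        omega
      · simp only [aChars]
        rw [heq]
    · rcases ih st2 (prev ++ [c]) consumed hInv2 (by rw [hflat, hXcons]) with
        ⟨e, ci, ⟨hlo, hM, hminim, hms⟩, hlt, heq2⟩ | ⟨hnm2, st3, heq3, hInv3⟩
      · left
        refine ⟨e, ci, ⟨by omega, hM, ?_, hms⟩, hlt, ?_⟩
        · intro e' he1 he2
          by_cases he3 : e' ≤ (prev ++ [c]).length
          · have he4 : e' = (prev ++ [c]).length := by omega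
            subst he4
            rw [mstop_append_iff cs (le_refl _)]
            exact hnm
          · exact hminim e' (by omega) he2
        · simp only [aChars]
          rw [heq]
          show aChars m sws cs st2 = Sum.inl (aEmitCut consumed ci)
          exact heq2
      · right
        refine ⟨?_, st3, ?_, hInv3⟩
        · intro e' he1
          by_cases he3 : e' ≤ (prev ++ [c]).length
          · have he4 : e' = (prev ++ [c]).length := by omega
            subst he4
            rw [mstop_append_iff cs (le_refl _)]
            exact hnm
          · exact hnm2 e' (by omega)
        · simp only [aChars]
          rw [heq]
          show aChars m sws cs st2 = Sum.inr st3
          exact heq3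

theorem aTokens_run (m : Nat) (sws : List String) (hm : ∀ s ∈ sws, s.toList.length ≤ m) :
    ∀ (toks : List String) (st : StA) (prev : List Char) (consumed : List String),
    InvA m st prev consumed → flatT consumed = prev →
    (∃ e c, CutRes sws (prev ++ flatT toks) prev.length e c ∧ c < sumLen (consumed ++ toks) ∧
      aTokens m sws toks st = aEmitCut (consumed ++ toks) c)
    ∨ ((∀ e, prev.length < e → ¬ Mstop sws (prev ++ flatT toks) e) ∧
      aTokens m sws toks st = consumed ++ toks) := by
  intro toks
  induction toks with
  | nil =>
    intro st prev consumed hInv hflat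
    right
    obtain ⟨h1, h2, h3, h4, h5, h6⟩ := hInv
    refine ⟨?_, ?_⟩
    · intro e he hM
      have := mstop_le_length hM
      simp only [flatT_nil, List.append_nil] at this
      omega
    · simp only [aTokens, List.append_nil, h3]
  | cons t ts ih =>
    intro st prev consumed hInv hflat
    obtain ⟨h1, h2, h3, h4, h5, h6⟩ := hInv
    have hInv2 : InvA m { st with buffer := st.buffer ++ [t] } prev (consumed ++ [t]) := by
      refine ⟨h1, h2, ?_, h4, h5, h6⟩
      show st.out ++ (st.buffer ++ [t]) = consumed ++ [t]
      rw [← List.append_assoc, h3]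
    have hflat2 : flatT (consumed ++ [t]) = prev ++ t.toList := by
      rw [flatT_append, hflat, flatT_singleton]
    have hXfull : prev ++ flatT (t :: ts) = (prev ++ t.toList) ++ flatT ts := by
      rw [flatT_cons, List.append_assoc]
    have hclen : consumed ++ t :: ts = (consumed ++ [t]) ++ ts := by simp
    rw [hXfull, hclen]
    have hplen2 : prev.length ≤ (prev ++ t.toList).length := by simp
    rcases aChars_run m sws hm t.toList { st with buffer := st.buffer ++ [t] } prev
        (consumed ++ [t]) hInv2 hflat2 with
      ⟨e, ci, ⟨hlo, hM, hminim, hms⟩, hlt, heq⟩ | ⟨hnm, st2, heq, hInv3⟩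
    · -- the cut fires inside this token
      left
      have hele : e ≤ (prev ++ t.toList).length := mstop_le_length hM
      refine ⟨e, ci, ⟨by omega, ?_, ?_, ?_⟩, ?_, ?_⟩
      · exact (mstop_append_iff (flatT ts) hele).2 hM
      · intro e2 he1 he2
        rw [mstop_append_iff (flatT ts) (by omega)]
        exact hminim e2 he1 he2
      · rw [minStart_append sws (flatT ts) hele]
        exact hms
      · rw [sumLen_append]
        omega
      · simp only [aTokens]
        rw [heq]
        show aEmitCut (consumed ++ [t]) ci = aEmitCut ((consumed ++ [t]) ++ ts) ci
        rw [aEmitCut_append_of_lt (consumed ++ [t]) ts ci hlt]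
    · -- no cut in this token: continue with the next one
      rcases ih st2 (prev ++ t.toList) (consumed ++ [t]) hInv3 hflat2 with
        ⟨e, ci, ⟨hlo, hM, hminim, hms⟩, hlt, heq2⟩ | ⟨hnm2, heq2⟩
      · left
        refine ⟨e, ci, ⟨by omega, hM, ?_, hms⟩, hlt, ?_⟩
        · intro e2 he1 he2
          by_cases he3 : e2 ≤ (prev ++ t.toList).length
          · rw [mstop_append_iff (flatT ts) he3]
            exact hnm e2 he1
          · exact hminim e2 (by omega) he2
        · simp only [aTokens]
          rw [heq]
          show aTokens m sws ts st2 = aEmitCut ((consumed ++ [t]) ++ ts) ci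
          exact heq2
      · right
        refine ⟨?_, ?_⟩
        · intro e2 he1
          by_cases he3 : e2 ≤ (prev ++ t.toList).length
          · rw [mstop_append_iff (flatT ts) he3]
            exact hnm e2 he1
          · exact hnm2 e2 (by omega)
        · simp only [aTokens]
          rw [heq]
          show aTokens m sws ts st2 = (consumed ++ [t]) ++ ts
          exact heq2

-- ---------- the B-side fold ----------

theorem bfold_spec (text : List Char) : ∀ (ws : List String) (acc : Option (Nat × Nat)),
    (∀ p, ws.foldl (bStep text) acc = some p →
      (acc = some p ∨ ∃ w ∈ ws, 0 ≤ PySem.Chars.find text w.toList ∧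
        p = ((PySem.Chars.find text w.toList).toNat + w.toList.length,
             (PySem.Chars.find text w.toList).toNat))) ∧
    (∀ p, ws.foldl (bStep text) acc = some p → ∀ w ∈ ws, 0 ≤ PySem.Chars.find text w.toList →
      ¬ (((PySem.Chars.find text w.toList).toNat + w.toList.length < p.1) ∨
         ((PySem.Chars.find text w.toList).toNat + w.toList.length = p.1 ∧
          (PySem.Chars.find text w.toList).toNat < p.2))) ∧
    (∀ p a, ws.foldl (bStep text) acc = some p → acc = some a →
      ¬ (a.1 < p.1 ∨ (a.1 = p.1 ∧ a.2 < p.2))) ∧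
    (ws.foldl (bStep text) acc = none ↔ acc = none ∧
      ∀ w ∈ ws, ¬ 0 ≤ PySem.Chars.find text w.toList) := by
  intro ws
  induction ws with
  | nil =>
    intro acc
    refine ⟨?_, ?_, ?_, ?_⟩
    · intro p hp; exact Or.inl hp
    · intro p _ w hw; simp at hw
    · intro p a hp ha
      rw [ha] at hp
      injection hp with hp
      subst hp
      obtain ⟨a1, a2⟩ := a
      simp only []
      omega
    · simp
  | cons w ws ih =>
    intro acc
    simp only [List.foldl_cons]
    by_cases hfw : 0 ≤ PySem.Chars.find text w.toList
    · -- this word has an occurrence; its candidate enters the running minimum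
      obtain ⟨ih1, ih2, ih3, ih4⟩ := ih (bStep text acc w)
      have hmemw : w ∈ w :: ws := by simp
      cases acc with
      | none =>
        have hacc : bStep text none w =
            some ((PySem.Chars.find text w.toList).toNat + w.toList.length,
                  (PySem.Chars.find text w.toList).toNat) := by
          simp only [bStep, if_pos hfw]
        refine ⟨?_, ?_, ?_, ?_⟩
        · intro p hp
          rcases ih1 p hp with h | ⟨w2, hw2, h0, hpc⟩
          · rw [hacc] at h
            injection h with h
            exact Or.inr ⟨w, hmemw, hfw, h.symm⟩
          · exact Or.inr ⟨w2, List.mem_cons_of_mem _ hw2, h0, hpc⟩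
        · intro p hp w2 hw2 h02
          rcases List.mem_cons.1 hw2 with rfl | hw2
          · have := ih3 p _ hp hacc
            dsimp only at this
            exact this
          · exact ih2 p hp w2 hw2 h02
        · intro p a hp ha
          simp at ha
        · constructor
          · intro hnone
            have := (ih4.1 hnone).1
            rw [hacc] at this
            simp at this
          · rintro ⟨-, hall⟩
            exact absurd hfw (hall w hmemw)
      | some b =>
        by_cases hlex : (PySem.Chars.find text w.toList).toNat + w.toList.length < b.1 ∨
            ((PySem.Chars.find text w.toList).toNat + w.toList.length = b.1 ∧
             (PySem.Chars.find text w.toList).toNat < b.2)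
        · have hacc : bStep text (some b) w =
              some ((PySem.Chars.find text w.toList).toNat + w.toList.length,
                    (PySem.Chars.find text w.toList).toNat) := by
            simp only [bStep, if_pos hfw]
            show (if (PySem.Chars.find text w.toList).toNat + w.toList.length < b.1 ∨
                ((PySem.Chars.find text w.toList).toNat + w.toList.length = b.1 ∧
                 (PySem.Chars.find text w.toList).toNat < b.2) then
                some ((PySem.Chars.find text w.toList).toNat + w.toList.length,
                      (PySem.Chars.find text w.toList).toNat)
              else some b) = _
            rw [if_pos hlex]
          refine ⟨?_, ?_, ?_, ?_⟩
          · intro p hp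
            rcases ih1 p hp with h | ⟨w2, hw2, h0, hpc⟩
            · rw [hacc] at h
              injection h with h
              exact Or.inr ⟨w, hmemw, hfw, h.symm⟩
            · exact Or.inr ⟨w2, List.mem_cons_of_mem _ hw2, h0, hpc⟩
          · intro p hp w2 hw2 h02
            rcases List.mem_cons.1 hw2 with rfl | hw2
            · have := ih3 p _ hp hacc
              dsimp only at this
              exact this
            · exact ih2 p hp w2 hw2 h02
          · intro p a hp ha
            injection ha with ha
            subst ha
            have hcp := ih3 p _ hp hacc
            dsimp only at hcp
            obtain ⟨p1, p2⟩ := p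
            obtain ⟨b1, b2⟩ := b
            dsimp only at *
            omega
          · constructor
            · intro hnone
              have := (ih4.1 hnone).1
              rw [hacc] at this
              simp at this
            · rintro ⟨-, hall⟩
              exact absurd hfw (hall w hmemw)
        · have hacc : bStep text (some b) w = some b := by
            simp only [bStep, if_pos hfw]
            show (if (PySem.Chars.find text w.toList).toNat + w.toList.length < b.1 ∨
                ((PySem.Chars.find text w.toList).toNat + w.toList.length = b.1 ∧
                 (PySem.Chars.find text w.toList).toNat < b.2) then
                some ((PySem.Chars.find text w.toList).toNat + w.toList.length,
                      (PySem.Chars.find text w.toList).toNat)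
              else some b) = _
            rw [if_neg hlex]
          refine ⟨?_, ?_, ?_, ?_⟩
          · intro p hp
            rcases ih1 p hp with h | ⟨w2, hw2, h0, hpc⟩
            · rw [hacc] at h
              exact Or.inl h
            · exact Or.inr ⟨w2, List.mem_cons_of_mem _ hw2, h0, hpc⟩
          · intro p hp w2 hw2 h02
            rcases List.mem_cons.1 hw2 with rfl | hw2
            · have hbp := ih3 p _ hp hacc
              obtain ⟨p1, p2⟩ := p
              obtain ⟨b1, b2⟩ := b
              dsimp only at *
              omega
            · exact ih2 p hp w2 hw2 h02
          · intro p a hp ha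
            injection ha with ha
            subst ha
            exact ih3 p _ hp hacc
          · constructor
            · intro hnone
              have := (ih4.1 hnone).1
              rw [hacc] at this
              simp at this
            · rintro ⟨-, hall⟩
              exact absurd hfw (hall w hmemw)
    · -- no occurrence: the accumulator passes through unchanged
      have hid : bStep text acc w = acc := by
        simp only [bStep, if_neg hfw]
      rw [hid]
      obtain ⟨ih1, ih2, ih3, ih4⟩ := ih acc
      refine ⟨?_, ?_, ?_, ?_⟩
      · intro p hp
        rcases ih1 p hp with h | ⟨w2, hw2, h0, hpc⟩
        · exact Or.inl h
        · exact Or.inr ⟨w2, List.mem_cons_of_mem _ hw2, h0, hpc⟩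
      · intro p hp w2 hw2 h02
        rcases List.mem_cons.1 hw2 with rfl | hw2
        · exact absurd h02 hfw
        · exact ih2 p hp w2 hw2 h02
      · exact ih3
      · rw [ih4]
        constructor
        · rintro ⟨h, hall⟩
          refine ⟨h, ?_⟩
          intro w2 hw2
          rcases List.mem_cons.1 hw2 with rfl | hw2
          · exact hfw
          · exact hall w2 hw2
        · rintro ⟨h, hall⟩
          exact ⟨h, fun w2 hw2 => hall w2 (List.mem_cons_of_mem _ hw2)⟩

/-- occurrence of `w` as a prefix of `T.drop i` gives a match ending at `i + |w|` -/
theorem matchAt_of_prefix_drop {w T : List Char} (hw : w ≠ []) {i : Nat}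
    (h : w <+: T.drop i) : MatchAt w T (i + w.length) := by
  rw [matchAt_iff_prefix]
  refine ⟨hw, by omega, ?_⟩
  have : i + w.length - w.length = i := by omega
  rwa [this]

-- ---------- max length of the stop words ----------

theorem foldl_max_le (f : String → Nat) : ∀ (l : List String) (a : Nat),
    (a ≤ l.foldl (fun acc s => Nat.max acc (f s)) a) ∧
    (∀ s ∈ l, f s ≤ l.foldl (fun acc s => Nat.max acc (f s)) a) := by
  intro l
  induction l with
  | nil => intro a; simp
  | cons s r ih =>
    intro a
    simp only [List.foldl_cons]
    obtain ⟨h1, h2⟩ := ih (Nat.max a (f s))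
    refine ⟨le_trans (Nat.le_max_left _ _) h1, ?_⟩
    intro s2 hs2
    rcases List.mem_cons.1 hs2 with rfl | hs2
    · exact le_trans (Nat.le_max_right _ _) h1
    · exact h2 s2 hs2

-- ---------- assembling the theorem ----------

theorem main_equal (token_stream : List String) (stop_words : List String) :
    cut_stream_stop_words token_stream stop_words
      = cut_stream_stop_words_alt token_stream stop_words := by
  cases stop_words with
  | nil => simp [cut_stream_stop_words, cut_stream_stop_words_alt]
  | cons s0 rest =>
    have hmax := foldl_max_le (fun s => s.toList.length) rest s0.toList.length
    have hm : ∀ s ∈ (s0 :: rest),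
        s.toList.length ≤ rest.foldl (fun a sw => Nat.max a sw.toList.length) s0.toList.length := by
      intro s hs
      rcases List.mem_cons.1 hs with rfl | hs
      · exact hmax.1
      · exact hmax.2 s hs
    have hInv0 : InvA (rest.foldl (fun a sw => Nat.max a sw.toList.length) s0.toList.length)
        ⟨[], [], [], 0, 0⟩ [] [] := by
      refine ⟨rfl, (pyTail_nil _).symm, rfl, rfl, ?_, Or.inl rfl⟩
      intro j hj
      simp at hj
    have hA : cut_stream_stop_words token_stream (s0 :: rest)
        = aTokens (rest.foldl (fun a sw => Nat.max a sw.toList.length) s0.toList.length)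
            (s0 :: rest) token_stream ⟨[], [], [], 0, 0⟩ := by
      simp only [cut_stream_stop_words]
    have hft : flatT token_stream = (token_stream.map String.toList).flatten := rfl
    rcases aTokens_run _ (s0 :: rest) hm token_stream ⟨[], [], [], 0, 0⟩ [] [] hInv0 rfl with
      ⟨e, ci, ⟨hlo, hM, hminim, hms⟩, hlt, heqA⟩ | ⟨hnm, heqA⟩
    · -- a stop word occurs: both sides cut at ci
      simp only [List.nil_append] at hlo hM hminim hms hlt heqA
      rw [hft] at hM hminim hms
      rw [hA, heqA]
      simp only [cut_stream_stop_words_alt]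
      obtain ⟨⟨sA, hsA, hmA, hciA⟩, hcimin⟩ := minStart_some hms
      have hsAne : sA.toList ≠ [] := hmA.1
      have hlA1 : 1 ≤ sA.toList.length := List.length_pos_iff.mpr hsAne
      have hlAe : sA.toList.length ≤ e := hmA.2.1
      have hsAw : sA ∈ List.filter (fun w => !w.toList.isEmpty) (s0 :: rest) :=
        List.mem_filter.2 ⟨hsA, by simpa using hsAne⟩
      have hwne3 : ¬((List.filter (fun w => !w.toList.isEmpty) (s0 :: rest)).isEmpty = true) := by
        rw [List.isEmpty_iff]
        exact List.ne_nil_of_mem hsAw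
      rw [if_neg hwne3]
      have hpreA : sA.toList <+: ((token_stream.map String.toList).flatten).drop ci := by
        rw [hciA]
        exact ((matchAt_iff_prefix _ _ _).1 hmA).2.2
      have hfge : 0 ≤ PySem.Chars.find ((token_stream.map String.toList).flatten) sA.toList := by
        rw [PySem.Chars.find_nonneg_iff]
        obtain ⟨r, hr⟩ := hpreA
        refine ⟨((token_stream.map String.toList).flatten).take ci, r, ?_⟩
        rw [List.append_assoc, hr, List.take_append_drop]
      have hspec := PySem.Chars.find_spec hfge
      have hile : (PySem.Chars.find ((token_stream.map String.toList).flatten) sA.toList).toNat ≤ ci := by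
        by_contra hgt
        exact hspec.2 ci (by omega) hpreA
      have hieq : (PySem.Chars.find ((token_stream.map String.toList).flatten) sA.toList).toNat = ci := by
        by_contra hne
        have hmatch := matchAt_of_prefix_drop hsAne hspec.1
        have hlt9 : (PySem.Chars.find ((token_stream.map String.toList).flatten) sA.toList).toNat
            + sA.toList.length < e := by omega
        have hpos9 : 0 < (PySem.Chars.find ((token_stream.map String.toList).flatten) sA.toList).toNat
            + sA.toList.length := by omega
        exact hminim _ hpos9 hlt9 ⟨sA, hsA, hmatch⟩
      have hcande : (PySem.Chars.find ((token_stream.map String.toList).flatten) sA.toList).toNat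
          + sA.toList.length = e := by omega
      have hcands : ∀ w2 ∈ List.filter (fun w => !w.toList.isEmpty) (s0 :: rest),
          0 ≤ PySem.Chars.find ((token_stream.map String.toList).flatten) w2.toList →
          ¬ ((PySem.Chars.find ((token_stream.map String.toList).flatten) w2.toList).toNat
                + w2.toList.length < e ∨
             ((PySem.Chars.find ((token_stream.map String.toList).flatten) w2.toList).toNat
                + w2.toList.length = e ∧
              (PySem.Chars.find ((token_stream.map String.toList).flatten) w2.toList).toNat < ci)) := by
        intro w2 hw2 hf2
        obtain ⟨hw2mem, hw2ne'⟩ := List.mem_filter.1 hw2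
        have hw2ne : w2.toList ≠ [] := by simpa using hw2ne'
        have hl2 : 1 ≤ w2.toList.length := List.length_pos_iff.mpr hw2ne
        have hspec2 := PySem.Chars.find_spec hf2
        have hmatch2 := matchAt_of_prefix_drop hw2ne hspec2.1
        have hnotlt : ¬ ((PySem.Chars.find ((token_stream.map String.toList).flatten) w2.toList).toNat
            + w2.toList.length < e) := by
          intro hlt2
          have hpos8 : 0 < (PySem.Chars.find ((token_stream.map String.toList).flatten) w2.toList).toNat
              + w2.toList.length := by omega
          exact hminim _ hpos8 hlt2 ⟨w2, hw2mem, hmatch2⟩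
        rintro (hlex | ⟨hlexe, hlexi⟩)
        · exact hnotlt hlex
        · have hmae : MatchAt w2.toList ((token_stream.map String.toList).flatten) e := by
            rw [← hlexe]
            exact hmatch2
          have := hcimin w2 hw2mem hmae
          omega
      obtain ⟨hb1, hb2, hb3, hb4⟩ := bfold_spec ((token_stream.map String.toList).flatten)
        (List.filter (fun w => !w.toList.isEmpty) (s0 :: rest)) none
      cases hr : List.foldl (bStep ((token_stream.map String.toList).flatten)) none
          (List.filter (fun w => !w.toList.isEmpty) (s0 :: rest)) with
      | none =>
        exact absurd hfge ((hb4.1 hr).2 sA hsAw)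
      | some p =>
        rcases hb1 p hr with h | ⟨w0, hw0, hf0, hp0⟩
        · simp at h
        · have hple := hb2 p hr sA hsAw hfge
          have hpcand := hcands w0 hw0 hf0
          obtain ⟨p1, p2⟩ := p
          simp only [Prod.mk.injEq] at hp0
          dsimp only at hple hpcand
          rw [hcande, hieq] at hple
          have hp1 : p1 = e ∧ p2 = ci := by
            obtain ⟨hp01, hp02⟩ := hp0
            constructor <;> omega
          show aEmitCut token_stream ci = bGreedy token_stream p2 0
          rw [hp1.2, bGreedy_eq_emitCut]
          simp
    · -- no stop word occurs anywhere: both sides pass the stream through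
      simp only [List.nil_append] at hnm heqA
      rw [hft] at hnm
      rw [hA, heqA]
      simp only [cut_stream_stop_words_alt]
      by_cases hwe : (List.filter (fun w => !w.toList.isEmpty) (s0 :: rest)).isEmpty = true
      · rw [if_pos hwe]
      · rw [if_neg hwe]
        have hb4 := (bfold_spec ((token_stream.map String.toList).flatten)
          (List.filter (fun w => !w.toList.isEmpty) (s0 :: rest)) none).2.2.2
        have hfold : List.foldl (bStep ((token_stream.map String.toList).flatten)) none
            (List.filter (fun w => !w.toList.isEmpty) (s0 :: rest)) = none := by
          rw [hb4]
          refine ⟨rfl, ?_⟩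
          intro w hw hfind
          obtain ⟨hwmem, hwne'⟩ := List.mem_filter.1 hw
          have hwne2 : w.toList ≠ [] := by simpa using hwne'
          have hspec := PySem.Chars.find_spec hfind
          have hmatch := matchAt_of_prefix_drop hwne2 hspec.1
          have hl1 : 1 ≤ w.toList.length := List.length_pos_iff.mpr hwne2
          have hpos7 : 0 < (PySem.Chars.find ((token_stream.map String.toList).flatten) w.toList).toNat
              + w.toList.length := by omega
          exact hnm _ hpos7 ⟨w, hwmem, hmatch⟩
        rw [hfold]

-- ===== VERDICT (by name: the statement is the Claim_ definition above) =====
theorem cut_stream_stop_words_spec : Claim_equal_cut_stream_stop_words := by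
  intro token_stream stop_words _
  unfold Spec_cut_stream_stop_words
  exact main_equal token_stream stop_words
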